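-- pv_equiv track=rewrite | github.com/mphomonyatsi3-web/doc-summarizer | app.py | heading_ranges
-- ===== SOURCE A (Python) =====
-- from typing import List, Tuple, Dict, Any, Optional
--
-- def heading_ranges(headings: List[Tuple[str, int]], total_pages: int) -> List[Tuple[str, int, int]]:
--     ranges = []
--     for idx, (title, start0) in enumerate(headings):
--         start1 = start0 + 1
--         if idx + 1 < len(headings):
--             next_start0 = headings[idx + 1][1]
--             end1 = max(start1, next_start0)
--         else:
--             end1 = total_pages
--         end1 = max(start1, end1)
--         ranges.append((title, start1, end1))
--     return ranges
-- ===== SOURCE B (Python) =====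
-- def heading_ranges(headings, total_pages):
--     # Backward single pass: walk the headings from last to first carrying the
--     # "next boundary" as state, so no look-ahead indexing is ever needed.
--     out = []
--     nxt = total_pages
--     for title, start0 in reversed(headings):
--         start1 = start0 + 1
--         out.append((title, start1, max(start1, nxt)))
--         nxt = start0
--     out.reverse()
--     return out
-- ===== Notes on version B (the rewrite author's own statement) =====
-- stated objective: alternative
-- what changed: A scans forward with index look-ahead (headings[idx+1], an idx+1<len branch and a redundant second max); B instead makes a single backward pass carrying the next boundary as accumulator state, so there is no indexing, no length branch and no look-ahead at all, then reverses the built list.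
import Mathlib
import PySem

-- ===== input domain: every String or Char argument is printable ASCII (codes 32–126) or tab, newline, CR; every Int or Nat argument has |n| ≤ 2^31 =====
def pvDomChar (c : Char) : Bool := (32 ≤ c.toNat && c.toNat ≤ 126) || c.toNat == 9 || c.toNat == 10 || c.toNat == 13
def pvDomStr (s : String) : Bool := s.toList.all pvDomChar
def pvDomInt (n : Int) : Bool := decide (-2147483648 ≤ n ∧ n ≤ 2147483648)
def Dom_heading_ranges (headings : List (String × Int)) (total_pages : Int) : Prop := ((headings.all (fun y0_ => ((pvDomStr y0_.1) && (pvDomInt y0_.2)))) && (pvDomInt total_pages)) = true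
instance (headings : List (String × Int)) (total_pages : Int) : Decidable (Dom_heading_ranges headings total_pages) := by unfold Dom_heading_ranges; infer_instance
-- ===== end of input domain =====

-- B replaces A's forward scan with index look-ahead by a single backward pass carrying the next boundary as accumulator state (alternative decomposition; return value only).

-- ===== PORT A =====
def heading_ranges (headings : List (String × Int)) (total_pages : Int) : List (String × Int × Int) :=
  (PySem.List.enumerate headings 0).foldl (fun ranges p =>
    let idx := p.1
    let title := p.2.1
    let start0 := p.2.2
    let start1 := start0 + 1
    let end1 : Int :=
      if idx + 1 < (headings.length : Int) then
        -- guard guarantees the index is in range, so Python's headings[idx+1] never raises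
        let next_start0 := (PySem.List.pyGetD headings (idx + 1) ("", 0)).2
        max start1 next_start0
      else total_pages
    let end1' := max start1 end1
    ranges ++ [(title, start1, end1')]) []

-- ===== PORT B =====
-- backward pass: fold over reversed(headings) carrying (out, nxt); then reverse out
def heading_ranges_alt (headings : List (String × Int)) (total_pages : Int) : List (String × Int × Int) :=
  let st := headings.reverse.foldl
    (fun (st : List (String × Int × Int) × Int) p =>
      let start1 := p.2 + 1
      (st.1 ++ [(p.1, start1, max start1 st.2)], p.2))
    ([], total_pages)
  st.1.reverse

-- ===== PRECONDITION & SPEC =====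
def Spec_heading_ranges (headings : List (String × Int)) (total_pages : Int) (out : List (String × Int × Int)) : Prop := out = heading_ranges_alt headings total_pages
instance (headings : List (String × Int)) (total_pages : Int) (out : List (String × Int × Int)) : Decidable (Spec_heading_ranges headings total_pages out) := by unfold Spec_heading_ranges; infer_instance

-- ===== CLAIM (what is proved, stated in full; the proofs are below) =====
def Claim_equal_heading_ranges : Prop := ∀ (headings : List (String × Int)) (total_pages : Int), Dom_heading_ranges headings total_pages → Spec_heading_ranges headings total_pages (heading_ranges headings total_pages)

-- ===== LEMMAS AND PROOFS =====

-- common middle form: each heading zipped with the following boundary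
def pvZipForm (headings : List (String × Int)) (total_pages : Int) : List (String × Int × Int) :=
  (headings.zip ((headings.map (fun p => p.2) ++ [total_pages]).drop 1)).map
    (fun q => (q.1.1, q.1.2 + 1, max (q.1.2 + 1) q.2))

theorem pv_getElem_enumerate {α : Type} (xs : List α) (s : Int) (i : Nat) (h : i < (PySem.List.enumerate xs s).length) :
    (PySem.List.enumerate xs s)[i] = (s + i, xs[i]'(by simpa [PySem.List.length_enumerate] using h)) := by
  induction xs generalizing s i with
  | nil => simp [PySem.List.enumerate_nil] at h
  | cons x xs ih =>
    cases i with
    | zero => simp [PySem.List.enumerate_cons]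
    | succ j =>
      have h' : j < (PySem.List.enumerate xs (s + 1)).length := by
        simpa [PySem.List.enumerate_cons] using h
      simp [PySem.List.enumerate_cons, ih (s + 1) j h']
      omega

theorem pv_A_eq_zipForm (headings : List (String × Int)) (total_pages : Int) :
    heading_ranges headings total_pages = pvZipForm headings total_pages := by
  unfold heading_ranges pvZipForm
  rw [PySem.List.foldl_append_singleton_eq_map]
  apply List.ext_getElem
  · simp [PySem.List.length_enumerate]
  · intro i hi₁ hi₂
    have hlen : i < headings.length := by
      simpa [PySem.List.length_enumerate] using hi₁
    simp only [List.nil_append, List.getElem_map, pv_getElem_enumerate headings 0 i (by simpa [PySem.List.length_enumerate] using hlen),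
      List.getElem_zip]
    have hb : ((headings.map (fun p => p.2) ++ [total_pages]).drop 1)[i]'(by
        simp; omega) = (headings.map (fun p => p.2) ++ [total_pages])[i+1]'(by simp; omega) := by
      simp
    by_cases hcase : i + 1 < headings.length
    · have hidx : (i : Int) + 1 < (headings.length : Int) := by exact_mod_cast hcase
      have hget : PySem.List.pyGetD headings ((i : Int) + 1) ("", 0) = headings[i+1] := by
        have := PySem.List.pyGetD_natCast headings (i + 1) ("", 0)
        push_cast at this
        simpa [List.getD_eq_getElem?_getD, List.getElem?_eq_getElem hcase] using this
      simp only [zero_add, if_pos hidx, hget, hb]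
      rw [← max_assoc, max_self, List.getElem_append_left (by simpa using hcase), List.getElem_map]
    · have hidx : ¬ ((i : Int) + 1 < (headings.length : Int)) := by exact_mod_cast hcase
      have hi1 : i + 1 = headings.length := by omega
      simp only [zero_add, if_neg hidx, hb]
      have : (headings.map (fun p => p.2) ++ [total_pages])[i+1]'(by simp; omega) = total_pages := by
        rw [List.getElem_append_right (by simp [hi1])]
        simp [hi1]
      simp [this]

-- the step function of B's backward fold, named for the lemmas
def pvStep (st : List (String × Int × Int) × Int) (p : String × Int) : List (String × Int × Int) × Int :=
  (st.1 ++ [(p.1, p.2 + 1, max (p.2 + 1) st.2)], p.2)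

theorem pv_fold_snd (xs : List (String × Int)) (acc : List (String × Int × Int)) (nxt : Int) :
    (xs.foldl pvStep (acc, nxt)).2 = (xs.getLast?.map (fun p => p.2)).getD nxt := by
  induction xs generalizing acc nxt with
  | nil => simp
  | cons x xs ih =>
    simp only [List.foldl_cons, pvStep, ih]
    cases h : xs.getLast? with
    | none => simp [List.getLast?_eq_none_iff.mp h]
    | some y => simp [List.getLast?_cons, h]

theorem pv_B_cons (x : String × Int) (xs : List (String × Int)) (total_pages : Int) :
    heading_ranges_alt (x :: xs) total_pages =
      (x.1, x.2 + 1, max (x.2 + 1) ((xs.head?.map (fun p => p.2)).getD total_pages)) ::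
        heading_ranges_alt xs total_pages := by
  show ((x :: xs).reverse.foldl pvStep ([], total_pages)).1.reverse =
      _ :: (xs.reverse.foldl pvStep ([], total_pages)).1.reverse
  rw [List.reverse_cons, List.foldl_append]
  simp only [List.foldl_cons, List.foldl_nil, pvStep]
  have hsnd := pv_fold_snd xs.reverse [] total_pages
  rw [List.getLast?_reverse] at hsnd
  rw [hsnd]
  simp

theorem pv_B_eq_zipForm (headings : List (String × Int)) (total_pages : Int) :
    heading_ranges_alt headings total_pages = pvZipForm headings total_pages := by
  induction headings with
  | nil => rfl
  | cons x xs ih =>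
    rw [pv_B_cons, ih]
    unfold pvZipForm
    cases xs with
    | nil => simp
    | cons y ys => simp

-- ===== VERDICT =====
theorem heading_ranges_spec : Claim_equal_heading_ranges := by
  intro headings total_pages _
  unfold Spec_heading_ranges
  rw [pv_A_eq_zipForm, pv_B_eq_zipForm]
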